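-- pv_equiv track=rewrite | github.com/jabalpureishan/LeetCode-and-GeeksForGeeks | Boolean Matrix - GFG/boolean-matrix.py | booleanMatrix
-- ===== SOURCE A (Python) =====
-- def booleanMatrix(matrix):
--     r,c = set(),set()
--     rows = len(matrix)
--     columns = len(matrix[0])
--     for i in range(rows):
--         for j in range(columns):
--             if matrix[i][j]==1:
--                 r.add(i)
--                 c.add(j)
--
--     for i in range(rows):
--         for j in range(columns):
--             if i in r or j in c:
--                 matrix[i][j] = 1
--     return matrix
-- ===== SOURCE B (Python) =====
-- def booleanMatrix(matrix):
--     cols = len(matrix[0])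
--     r = {i for i, row in enumerate(matrix)
--          if any(row[j] == 1 for j in range(cols))}
--     c = {j for j in range(cols)
--          if any(row[j] == 1 for row in matrix)}
--     for i in r:
--         for j in range(cols):
--             matrix[i][j] = 1
--     for j in c:
--         for i in range(len(matrix)):
--             matrix[i][j] = 1
--     return matrix
-- ===== Notes on version B (the rewrite author's own statement) =====
-- stated objective: alternative
-- what changed: Phase 2 no longer scans every cell with a membership test: it iterates directly over the collected sets, blasting each marked row whole and then each marked column whole; phase 1 builds the row set and the column set by two separate direct comprehensions instead of one nested scan with set.add.
import Mathlib
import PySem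

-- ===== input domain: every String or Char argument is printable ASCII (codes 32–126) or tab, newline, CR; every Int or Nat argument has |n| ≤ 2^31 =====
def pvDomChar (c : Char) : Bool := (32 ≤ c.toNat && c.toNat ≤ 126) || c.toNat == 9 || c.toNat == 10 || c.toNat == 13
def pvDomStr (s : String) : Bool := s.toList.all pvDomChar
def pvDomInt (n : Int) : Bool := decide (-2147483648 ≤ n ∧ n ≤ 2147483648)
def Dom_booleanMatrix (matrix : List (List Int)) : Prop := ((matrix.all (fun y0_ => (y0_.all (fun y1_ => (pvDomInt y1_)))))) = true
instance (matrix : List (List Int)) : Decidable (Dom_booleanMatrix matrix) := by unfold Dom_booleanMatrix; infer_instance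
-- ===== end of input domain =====

-- B rewrites phase 2 to iterate over the collected sets (whole rows, then whole columns)
-- instead of re-scanning every cell with a membership test; both A and B mutate the
-- argument in place in Python — the equivalence proved here is about the return value.

-- shared helper: the Python statement matrix[i][j] = 1 (i, j in range under Pre_)
def setCell (m : List (List Int)) (i j : Nat) : List (List Int) :=
  m.set i ((m.getD i []).set j 1)

-- ===== PORT A =====
def booleanMatrix (matrix : List (List Int)) : List (List Int) :=
  let rows := matrix.length
  let columns := (matrix.headD []).length   -- len(matrix[0]); matrix ≠ [] by Pre_
  let rc : PySem.Set Nat × PySem.Set Nat :=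
    (List.range rows).foldl (fun rc i =>
      (List.range columns).foldl (fun rc j =>
        if (matrix.getD i []).getD j 0 = 1 then
          (PySem.Set.add rc.1 i, PySem.Set.add rc.2 j)
        else rc) rc)
      (PySem.Set.empty, PySem.Set.empty)
  (List.range rows).foldl (fun m i =>
    (List.range columns).foldl (fun m j =>
      if PySem.Set.contains rc.1 i || PySem.Set.contains rc.2 j then setCell m i j
      else m) m)
    matrix

-- ===== PORT B =====
def booleanMatrix_alt (matrix : List (List Int)) : List (List Int) :=
  let cols := (matrix.headD []).length
  let r : PySem.Set Nat := PySem.Set.ofList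
    ((List.range matrix.length).filter (fun i =>
      (List.range cols).any (fun j => (matrix.getD i []).getD j 0 == 1)))
  let c : PySem.Set Nat := PySem.Set.ofList
    ((List.range cols).filter (fun j =>
      matrix.any (fun row => row.getD j 0 == 1)))
  let m1 := r.foldl (fun m i =>
    (List.range cols).foldl (fun m j => setCell m i j) m) matrix
  c.foldl (fun m j =>
    (List.range matrix.length).foldl (fun m i => setCell m i j) m) m1

-- ===== PRECONDITION & SPEC =====
-- A raises IndexError on the empty matrix (matrix[0]) and on matrices whose later
-- rows are shorter than the first row (matrix[i][j] out of range); Pre_ excludes exactly those.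
def Pre_booleanMatrix (matrix : List (List Int)) : Prop :=
  matrix ≠ [] ∧ ∀ row ∈ matrix, (matrix.headD []).length ≤ row.length

instance (matrix : List (List Int)) : Decidable (Pre_booleanMatrix matrix) := by
  unfold Pre_booleanMatrix; infer_instance

def pvWitness_booleanMatrix : List (List Int) := [[0, 1], [0, 0]]

def Spec_booleanMatrix (matrix : List (List Int)) (out : List (List Int)) : Prop :=
  out = booleanMatrix_alt matrix
instance (matrix : List (List Int)) (out : List (List Int)) : Decidable (Spec_booleanMatrix matrix out) := by
  unfold Spec_booleanMatrix; infer_instance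

-- ===== CLAIM (what is proved, stated in full; the proofs are below) =====
def Claim_equal_booleanMatrix : Prop := ∀ (matrix : List (List Int)), Dom_booleanMatrix matrix → Pre_booleanMatrix matrix → Spec_booleanMatrix matrix (booleanMatrix matrix)

-- ===== LEMMAS AND PROOFS =====

-- generic sequence of matrix[i][j] = 1 writes
def applyCells (L : List (Nat × Nat)) (m : List (List Int)) : List (List Int) :=
  L.foldl (fun m p => setCell m p.1 p.2) m

theorem applyCells_nil (m : List (List Int)) : applyCells [] m = m := rfl

theorem applyCells_cons (p : Nat × Nat) (L : List (Nat × Nat)) (m : List (List Int)) :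
    applyCells (p :: L) m = applyCells L (setCell m p.1 p.2) := rfl

theorem applyCells_append (L1 L2 : List (Nat × Nat)) (m : List (List Int)) :
    applyCells (L1 ++ L2) m = applyCells L2 (applyCells L1 m) := by
  simp [applyCells, List.foldl_append]

theorem length_setCell (m : List (List Int)) (i j : Nat) :
    (setCell m i j).length = m.length := by simp [setCell]

theorem rowlen_setCell (m : List (List Int)) (i j a : Nat) :
    ((setCell m i j).getD a []).length = (m.getD a []).length := by
  simp only [setCell, List.getD, List.getElem?_set]
  by_cases h : i = a
  · subst h
    by_cases hl : i < m.length <;>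
      simp [hl]
  · simp [h]

theorem length_applyCells (L : List (Nat × Nat)) (m : List (List Int)) :
    (applyCells L m).length = m.length := by
  induction L generalizing m with
  | nil => rfl
  | cons p L ih => rw [applyCells_cons, ih, length_setCell]

theorem rowlen_applyCells (L : List (Nat × Nat)) (m : List (List Int)) (a : Nat) :
    ((applyCells L m).getD a []).length = (m.getD a []).length := by
  induction L generalizing m with
  | nil => rfl
  | cons p L ih => rw [applyCells_cons, ih, rowlen_setCell]

theorem getD_setCell (m : List (List Int)) (i j a b : Nat) :
    ((setCell m i j).getD a []).getD b 0 =
      if a = i ∧ b = j ∧ a < m.length ∧ b < (m.getD a []).length then 1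
      else (m.getD a []).getD b 0 := by
  simp only [setCell, List.getD, List.getElem?_set]
  by_cases hai : i = a
  · subst hai
    by_cases hl : i < m.length
    · simp only [hl, if_true, List.getElem?_eq_getElem hl, Option.getD_some,
        List.getElem?_set]
      by_cases hbj : j = b
      · subst hbj
        by_cases hj : j < m[i].length
        · simp [hj]
        · simp [hj]
      · simp only [hbj]
        simp
        exact fun h _ => (hbj h.symm).elim
    · simp [hl]
  · simp [hai]
    exact fun h _ _ _ => (hai h.symm).elim

theorem getD_applyCells (L : List (Nat × Nat)) (m : List (List Int)) (a b : Nat) :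
    ((applyCells L m).getD a []).getD b 0 =
      if (a, b) ∈ L ∧ a < m.length ∧ b < (m.getD a []).length then 1
      else (m.getD a []).getD b 0 := by
  induction L generalizing m with
  | nil => simp [applyCells_nil]
  | cons p L ih =>
    rw [applyCells_cons, ih, length_setCell, rowlen_setCell, getD_setCell]
    obtain ⟨i, j⟩ := p
    by_cases hm : (a, b) ∈ L <;> by_cases hp : a = i ∧ b = j <;>
      by_cases hb : a < m.length ∧ b < (m.getD a []).length <;>
      simp_all [Prod.ext_iff, and_assoc]

-- extensionality for matrices of equal shape via getD
theorem matrix_ext (m1 m2 : List (List Int))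
    (hlen : m1.length = m2.length)
    (hrow : ∀ a, (m1.getD a []).length = (m2.getD a []).length)
    (hval : ∀ a b, (m1.getD a []).getD b 0 = (m2.getD a []).getD b 0) :
    m1 = m2 := by
  apply List.ext_getElem hlen
  intro a ha1 ha2
  have hga : m1.getD a [] = m1[a] := by simp [List.getD, List.getElem?_eq_getElem ha1]
  have hgb : m2.getD a [] = m2[a] := by simp [List.getD, List.getElem?_eq_getElem ha2]
  apply List.ext_getElem
  · have := hrow a; rwa [hga, hgb] at this
  intro b hb1 hb2
  have := hval a b
  rw [hga, hgb] at this
  simpa [List.getD, List.getElem?_eq_getElem hb1, List.getElem?_eq_getElem hb2] using this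

-- A's phase-2 inner loop as applyCells of the filtered column list
theorem foldl_if_setCell (l : List Nat) (p : Nat → Bool) (i : Nat) (m : List (List Int)) :
    l.foldl (fun m j => if p j then setCell m i j else m) m =
      applyCells ((l.filter p).map (fun j => (i, j))) m := by
  induction l generalizing m with
  | nil => rfl
  | cons j l ih =>
    by_cases hp : p j <;> simp [hp, ih, applyCells_cons]

-- B's inner loops as applyCells
theorem foldl_setCell_row (l : List Nat) (i : Nat) (m : List (List Int)) :
    l.foldl (fun m j => setCell m i j) m = applyCells (l.map (fun j => (i, j))) m := by
  simp [applyCells, List.foldl_map]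

theorem foldl_setCell_col (l : List Nat) (j : Nat) (m : List (List Int)) :
    l.foldl (fun m i => setCell m i j) m = applyCells (l.map (fun i => (i, j))) m := by
  simp [applyCells, List.foldl_map]

-- outer folds of applyCells collapse to one applyCells of the flattened list
theorem foldl_applyCells (l : List Nat) (f : Nat → List (Nat × Nat)) (m : List (List Int)) :
    l.foldl (fun m i => applyCells (f i) m) m = applyCells (l.flatMap f) m := by
  induction l generalizing m with
  | nil => rfl
  | cons i l ih => simp [List.flatMap_cons, applyCells_append, ih]

-- phase-1 characterisation: membership in the sets built by A's nested fold
theorem phase1_inner (cell : Nat → Nat → Int) (l : List Nat) (i : Nat)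
    (s : PySem.Set Nat × PySem.Set Nat) :
    (∀ x, x ∈ (l.foldl (fun rc j => if cell i j = 1 then
        (PySem.Set.add rc.1 i, PySem.Set.add rc.2 j) else rc) s).1 ↔
      x ∈ s.1 ∨ (x = i ∧ ∃ j ∈ l, cell i j = 1)) ∧
    (∀ y, y ∈ (l.foldl (fun rc j => if cell i j = 1 then
        (PySem.Set.add rc.1 i, PySem.Set.add rc.2 j) else rc) s).2 ↔
      y ∈ s.2 ∨ ∃ j ∈ l, cell i j = 1 ∧ y = j) := by
  induction l generalizing s with
  | nil => simp
  | cons j l ih =>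
    simp only [List.foldl_cons, List.mem_cons]
    by_cases hc : cell i j = 1
    · simp only [if_pos hc]
      refine ⟨fun x => ?_, fun y => ?_⟩
      · rw [(ih _).1 x]
        simp only [PySem.Set.mem_add]
        constructor
        · rintro ((h | rfl) | ⟨rfl, j', hj', h1⟩)
          · exact Or.inl h
          · exact Or.inr ⟨rfl, j, Or.inl rfl, hc⟩
          · exact Or.inr ⟨rfl, j', Or.inr hj', h1⟩
        · rintro (h | ⟨rfl, j', (rfl | hj'), h1⟩)
          · exact Or.inl (Or.inl h)
          · exact Or.inl (Or.inr rfl)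
          · exact Or.inr ⟨rfl, j', hj', h1⟩
      · rw [(ih _).2 y]
        simp only [PySem.Set.mem_add]
        constructor
        · rintro ((h | hyj) | ⟨j', hj', h1, hyj⟩)
          · exact Or.inl h
          · exact Or.inr ⟨j, Or.inl rfl, hc, hyj⟩
          · exact Or.inr ⟨j', Or.inr hj', h1, hyj⟩
        · rintro (h | ⟨j', (hjj | hj'), h1, hyj⟩)
          · exact Or.inl (Or.inl h)
          · exact Or.inl (Or.inr (hyj.trans hjj))
          · exact Or.inr ⟨j', hj', h1, hyj⟩
    · simp only [if_neg hc]
      refine ⟨fun x => ?_, fun y => ?_⟩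
      · rw [(ih s).1 x]
        constructor
        · rintro (h | ⟨rfl, j', hj', h1⟩)
          · exact Or.inl h
          · exact Or.inr ⟨rfl, j', Or.inr hj', h1⟩
        · rintro (h | ⟨rfl, j', (rfl | hj'), h1⟩)
          · exact Or.inl h
          · exact absurd h1 hc
          · exact Or.inr ⟨rfl, j', hj', h1⟩
      · rw [(ih s).2 y]
        constructor
        · rintro (h | ⟨j', hj', h1, hyj⟩)
          · exact Or.inl h
          · exact Or.inr ⟨j', Or.inr hj', h1, hyj⟩
        · rintro (h | ⟨j', (hjj | hj'), h1, hyj⟩)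
          · exact Or.inl h
          · exact absurd (hjj ▸ h1) hc
          · exact Or.inr ⟨j', hj', h1, hyj⟩

theorem phase1_outer (cell : Nat → Nat → Int) (li lj : List Nat)
    (s : PySem.Set Nat × PySem.Set Nat) :
    (∀ x, x ∈ (li.foldl (fun rc i => lj.foldl (fun rc j => if cell i j = 1 then
        (PySem.Set.add rc.1 i, PySem.Set.add rc.2 j) else rc) rc) s).1 ↔
      x ∈ s.1 ∨ ∃ i ∈ li, x = i ∧ ∃ j ∈ lj, cell i j = 1) ∧
    (∀ y, y ∈ (li.foldl (fun rc i => lj.foldl (fun rc j => if cell i j = 1 then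
        (PySem.Set.add rc.1 i, PySem.Set.add rc.2 j) else rc) rc) s).2 ↔
      y ∈ s.2 ∨ ∃ i ∈ li, ∃ j ∈ lj, cell i j = 1 ∧ y = j) := by
  induction li generalizing s with
  | nil => simp
  | cons i li ih =>
    simp only [List.foldl_cons, List.mem_cons]
    constructor
    · intro x
      rw [(ih _).1 x, (phase1_inner cell lj i s).1 x]
      constructor
      · rintro ((h | ⟨hxi, hj⟩) | ⟨i', hi', hxi, hj⟩)
        · exact Or.inl h
        · exact Or.inr ⟨i, Or.inl rfl, hxi, hj⟩
        · exact Or.inr ⟨i', Or.inr hi', hxi, hj⟩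
      · rintro (h | ⟨i', (hii | hi'), hxi, hj⟩)
        · exact Or.inl (Or.inl h)
        · exact Or.inl (Or.inr ⟨hxi.trans hii, hii ▸ hj⟩)
        · exact Or.inr ⟨i', hi', hxi, hj⟩
    · intro y
      rw [(ih _).2 y, (phase1_inner cell lj i s).2 y]
      constructor
      · rintro ((h | hj) | ⟨i', hi', hj⟩)
        · exact Or.inl h
        · exact Or.inr ⟨i, Or.inl rfl, hj⟩
        · exact Or.inr ⟨i', Or.inr hi', hj⟩
      · rintro (h | ⟨i', (hii | hi'), hj⟩)
        · exact Or.inl (Or.inl h)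
        · exact Or.inl (Or.inr (hii ▸ hj))
        · exact Or.inr ⟨i', hi', hj⟩

theorem if_iff_int {c1 c2 : Prop} [Decidable c1] [Decidable c2] (h : c1 ↔ c2) (x : Int)
    (y : Int) : (if c1 then x else y) = if c2 then x else y := by
  split_ifs with h1 h2 <;> first | rfl | (exfalso; tauto)

-- ===== VERDICT (by name: the statement is the Claim_ definition above) =====
theorem booleanMatrix_spec : Claim_equal_booleanMatrix := by
  intro matrix _ _hpre
  unfold Spec_booleanMatrix booleanMatrix booleanMatrix_alt
  simp only [foldl_if_setCell, foldl_setCell_row, foldl_setCell_col, foldl_applyCells]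
  rw [← applyCells_append]
  have h1 := fun x => (phase1_outer (fun i j => (matrix.getD i []).getD j 0)
    (List.range matrix.length) (List.range (matrix.headD []).length)
    (PySem.Set.empty, PySem.Set.empty)).1 x
  have h2 := fun y => (phase1_outer (fun i j => (matrix.getD i []).getD j 0)
    (List.range matrix.length) (List.range (matrix.headD []).length)
    (PySem.Set.empty, PySem.Set.empty)).2 y
  simp only [PySem.Set.empty, List.not_mem_nil, false_or, List.mem_range] at h1 h2
  have hrow : ∀ b : Nat, (∃ row ∈ matrix, row.getD b 0 = 1) ↔
      ∃ i, i < matrix.length ∧ (matrix.getD i []).getD b 0 = 1 := by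
    intro b
    constructor
    · rintro ⟨row, hm, hv⟩
      obtain ⟨i, hi, rfl⟩ := List.mem_iff_getElem.mp hm
      exact ⟨i, hi, by simpa [List.getD, List.getElem?_eq_getElem hi] using hv⟩
    · rintro ⟨i, hi, hv⟩
      exact ⟨matrix[i], List.getElem_mem hi,
        by simpa [List.getD, List.getElem?_eq_getElem hi] using hv⟩
  refine matrix_ext _ _ ?_ ?_ ?_
  · rw [length_applyCells, length_applyCells]
  · intro a; rw [rowlen_applyCells, rowlen_applyCells]
  · intro a b
    rw [getD_applyCells, getD_applyCells]
    apply if_iff_int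
    apply and_congr_left
    intro hb
    simp only [List.mem_append, List.mem_flatMap, List.mem_map, List.mem_filter,
      List.mem_range, List.any_eq_true, beq_iff_eq, Prod.mk.injEq,
      PySem.Set.mem_ofList, Bool.or_eq_true, PySem.Set.contains_iff,
      h1, h2, hrow, PySem.Set.empty]
    constructor
    · rintro ⟨a1, ha1, a2, ⟨ha2, hmark⟩, rfl, rfl⟩
      rcases hmark with ⟨i, hi, rfl, hj⟩ | ⟨i, hi, j, hjlt, hone, rfl⟩
      · exact Or.inl ⟨a1, ⟨ha1, hj⟩, a2, ha2, rfl, rfl⟩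
      · exact Or.inr ⟨a2, ⟨hjlt, i, hi, hone⟩, a1, ha1, rfl, rfl⟩
    · rintro (⟨a1, ⟨ha1, j, hjlt, hone⟩, a2, ha2, rfl, rfl⟩ | ⟨a2, ⟨ha2, i, hi, hone⟩, a1, ha1, rfl, rfl⟩)
      · exact ⟨a1, ha1, a2, ⟨ha2, Or.inl ⟨a1, ha1, rfl, j, hjlt, hone⟩⟩, rfl, rfl⟩
      · exact ⟨a1, ha1, a2, ⟨ha2, Or.inr ⟨i, hi, a2, ha2, hone, rfl⟩⟩, rfl, rfl⟩
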